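-- pv_equiv track=rewrite | github.com/shimi-lab/make_blender_script | mk_blender_scr/blender/functions.py | get_unique_items
-- ===== SOURCE A (Python) =====
-- def get_unique_items(l):
--     l = list(reversed(l))
--     return_list = []
--     sum_list = set([])
--     for i in l:
--         s = set(i)
--         dif = s-sum_list
--         return_list.append(sorted(list(dif)))
--         sum_list |= s
--     return_list = list(reversed(return_list))
--     return return_list
-- ===== SOURCE B (Python) =====
-- def get_unique_items(l):
--     owner = {}
--     for idx, sub in enumerate(l):
--         for x in sub:
--             owner[x] = idx
--     return [sorted({x for x in sub if owner[x] == idx}) for idx, sub in enumerate(l)]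
-- ===== Notes on version B (the rewrite author's own statement) =====
-- stated objective: alternative
-- what changed: Replaces the reverse-iterate-with-accumulated-seen-set-then-reverse-both-ways loop by two forward passes: a dict mapping each item to the index of the last sublist containing it, then a comprehension keeping an item in a sublist iff that dict points at it.
import Mathlib
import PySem

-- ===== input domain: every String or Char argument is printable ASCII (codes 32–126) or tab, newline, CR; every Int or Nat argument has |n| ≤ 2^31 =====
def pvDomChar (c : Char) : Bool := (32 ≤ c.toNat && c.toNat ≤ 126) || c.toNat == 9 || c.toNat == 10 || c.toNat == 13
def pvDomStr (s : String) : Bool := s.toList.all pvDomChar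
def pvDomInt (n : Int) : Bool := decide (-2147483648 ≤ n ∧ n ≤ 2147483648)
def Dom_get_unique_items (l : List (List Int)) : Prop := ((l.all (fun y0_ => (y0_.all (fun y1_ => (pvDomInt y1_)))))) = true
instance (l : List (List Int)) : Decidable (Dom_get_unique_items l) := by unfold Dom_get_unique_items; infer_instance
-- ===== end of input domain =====

-- B replaces A's reverse-scan with an accumulated seen-set by two forward passes:
-- a dict of each item's last sublist index, then a filtering comprehension.

-- ===== PORT A =====
-- one loop step of A: s = set(i); dif = s - sum_list; append sorted(dif); sum_list |= s
def pvStepA (acc : List (List Int) × PySem.Set Int) (i : List Int) :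
    List (List Int) × PySem.Set Int :=
  let s := PySem.Set.ofList i
  let dif := PySem.Set.diff s acc.2
  (acc.1 ++ [PySem.List.sorted dif (fun x => x) false], PySem.Set.union acc.2 s)

def get_unique_items (l : List (List Int)) : List (List Int) :=
  let lr := l.reverse
  let st := lr.foldl pvStepA ([], PySem.Set.empty)
  st.1.reverse

-- ===== PORT B =====
-- owner[x] in the Python always hits (x was inserted in the first pass), so the
-- getD default -1 is never consulted and no KeyError can occur.
def get_unique_items_alt (l : List (List Int)) : List (List Int) :=
  let owner : PySem.Dict Int Int :=
    (PySem.List.enumerate l).foldl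
      (fun d p => p.2.foldl (fun d x => d.insert x p.1) d) PySem.Dict.empty
  (PySem.List.enumerate l).map (fun p =>
    PySem.List.sorted
      (PySem.Set.ofList (p.2.filter (fun x => owner.getD x (-1) == p.1)))
      (fun x => x) false)

-- ===== PRECONDITION & SPEC =====
def Spec_get_unique_items (l : List (List Int)) (out : List (List Int)) : Prop := out = get_unique_items_alt l
instance (l : List (List Int)) (out : List (List Int)) : Decidable (Spec_get_unique_items l out) := by unfold Spec_get_unique_items; infer_instance

-- ===== CLAIM (what is proved, stated in full; the proofs are below) =====
def Claim_equal_get_unique_items : Prop := ∀ (l : List (List Int)), Dom_get_unique_items l → Spec_get_unique_items l (get_unique_items l)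

-- ===== LEMMAS AND PROOFS =====

-- proof helper: B's map-over-enumerate-with-slices, written as structural recursion
def pvAltRec : List (List Int) → List (List Int)
  | [] => []
  | y :: rest =>
      PySem.List.sorted
        (PySem.Set.ofList (y.filter (fun x => ! rest.any (fun lat => lat.contains x))))
        (fun x => x) false :: pvAltRec rest

-- membership in A's accumulated seen-set after folding over m
theorem pvSeenA_mem (m : List (List Int)) (ret : List (List Int)) (s : PySem.Set Int)
    (x : Int) : x ∈ (m.foldl pvStepA (ret, s)).2 ↔ x ∈ s ∨ ∃ sub ∈ m, x ∈ sub := by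
  induction m generalizing ret s with
  | nil => simp
  | cons y m ih =>
      simp only [List.foldl_cons, pvStepA]
      rw [ih]
      simp [PySem.Set.mem_union, PySem.Set.mem_ofList]
      tauto

-- A on a cons: head computed from the union of the tail, tail is A of the tail
theorem pvA_cons (y : List Int) (rest : List (List Int)) :
    get_unique_items (y :: rest) =
      PySem.List.sorted
        (PySem.Set.diff (PySem.Set.ofList y) (rest.reverse.foldl pvStepA ([], PySem.Set.empty)).2)
        (fun x => x) false :: get_unique_items rest := by
  simp only [get_unique_items, List.reverse_cons, List.foldl_append, List.foldl_cons,
    List.foldl_nil]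
  simp [pvStepA]

-- get? of the inner pass over one sublist: every element now maps to n
theorem pvInner_get? (y : List Int) (d : PySem.Dict Int Int) (n x : Int) :
    (y.foldl (fun d x => d.insert x n) d).get? x = if x ∈ y then some n else d.get? x := by
  induction y generalizing d with
  | nil => simp
  | cons z y ih =>
      rw [List.foldl_cons, ih]
      by_cases hzy : x ∈ y <;> by_cases hxz : x = z <;>
        simp [hzy, hxz, PySem.Dict.get?_insert]

-- index of the LAST sublist of l containing x (proof-side characterisation of owner)
def pvLast (x : Int) : List (List Int) → Option Nat
  | [] => none
  | y :: rest =>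
      match pvLast x rest with
      | some j => some (j + 1)
      | none => if x ∈ y then some 0 else none

theorem pvOwner_get? (l : List (List Int)) (k : Int) (d : PySem.Dict Int Int) (x : Int) :
    ((PySem.List.enumerate l k).foldl
        (fun d p => p.2.foldl (fun d x => d.insert x p.1) d) d).get? x =
      match pvLast x l with
      | some j => some (k + (j : Int))
      | none => d.get? x := by
  induction l generalizing k d with
  | nil => simp [PySem.List.enumerate, pvLast]
  | cons y rest ih =>
      rw [PySem.List.enumerate_cons, List.foldl_cons, ih, pvLast]
      cases hrest : pvLast x rest with
      | some j => simp only; congr 1; push_cast; ring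
      | none =>
          simp only [pvInner_get?]
          by_cases hxy : x ∈ y <;> simp [hxy]

theorem pvLast_none (x : Int) (l : List (List Int)) :
    pvLast x l = none ↔ ∀ sub ∈ l, x ∉ sub := by
  induction l with
  | nil => simp [pvLast]
  | cons y rest ih =>
      rw [pvLast]
      cases hrest : pvLast x rest with
      | some j => simp [← ih, hrest]
      | none =>
          by_cases hxy : x ∈ y <;> simp [hxy, ← ih, hrest]

theorem pvLast_some (x : Int) (l : List (List Int)) (j : Nat) :
    pvLast x l = some j ↔
      ∃ y rest, l.drop j = y :: rest ∧ x ∈ y ∧ ∀ sub ∈ rest, x ∉ sub := by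
  induction l generalizing j with
  | nil => simp [pvLast]
  | cons y rest ih =>
      cases j with
      | zero =>
          rw [pvLast]
          simp only [List.drop_zero]
          cases hrest : pvLast x rest with
          | some j' =>
              constructor
              · intro h; simp at h
              · rintro ⟨y', rest', he, hxy, hn⟩
                injection he with h1 h2
                subst h1; subst h2
                rw [(pvLast_none x rest).mpr hn] at hrest
                simp at hrest
          | none =>
              have hnone := (pvLast_none x rest).mp hrest
              by_cases hxy : x ∈ y
              · simp only [if_pos hxy]
                constructor
                · intro _; exact ⟨y, rest, rfl, hxy, hnone⟩
                · intro _; trivial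
              · simp only [if_neg hxy]
                constructor
                · intro h; simp at h
                · rintro ⟨y', rest', he, hxy', hn⟩
                  injection he with h1 h2
                  subst h1
                  exact absurd hxy' hxy
      | succ j' =>
          rw [pvLast]
          cases hrest : pvLast x rest with
          | some j'' =>
              simp only [List.drop_succ_cons, Option.some.injEq, Nat.succ.injEq]
              rw [← ih j', hrest]
              simp [eq_comm]
          | none =>
              simp only [List.drop_succ_cons, ← ih j', hrest]
              by_cases hxy : x ∈ y <;> simp [hxy]

-- the dict test 'owner[x] == i' IS the suffix-membership test, for x in the i-th sublist
theorem pvOwner_pred (L : List (List Int)) (i : Nat) (y : List Int)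
    (rest : List (List Int)) (h : L.drop i = y :: rest) (x : Int) (hx : x ∈ y) :
    (((PySem.List.enumerate L).foldl
        (fun d p => p.2.foldl (fun d x => d.insert x p.1) d)
        PySem.Dict.empty).getD x (-1) == (i : Int)) =
      ! rest.any (fun lat => lat.contains x) := by
  have hyL : y ∈ L := List.mem_of_mem_drop (h ▸ List.mem_cons_self)
  obtain ⟨j, hj⟩ : ∃ j, pvLast x L = some j := by
    cases hl : pvLast x L with
    | some j => exact ⟨j, rfl⟩
    | none => exact absurd hx ((pvLast_none x L).mp hl y hyL)
  have hget : (((PySem.List.enumerate L).foldl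
      (fun d p => p.2.foldl (fun d x => d.insert x p.1) d)
      PySem.Dict.empty).getD x (-1)) = (j : Int) := by
    rw [PySem.Dict.getD_eq_get?_getD, pvOwner_get?, hj]; simp
  rw [hget]
  by_cases hany : rest.any (fun lat => lat.contains x) = true
  · -- some later sublist contains x, so the last index is not i
    simp only [hany, Bool.not_true, beq_eq_false_iff_ne, ne_eq, Int.natCast_inj]
    intro hji
    subst hji
    obtain ⟨y', rest', he, _, hn⟩ := (pvLast_some x L j).mp hj
    rw [h] at he
    obtain ⟨rfl, rfl⟩ : y' = y ∧ rest' = rest := by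
      injection he with h1 h2
      exact ⟨h1.symm, h2.symm⟩
    simp only [List.any_eq_true, List.contains_iff_mem] at hany
    obtain ⟨lat, hlat, hxlat⟩ := hany
    exact hn lat hlat (by simpa using hxlat)
  · -- no later sublist contains x, so the last index is exactly i
    have hn : ∀ sub ∈ rest, x ∉ sub := by
      simp only [List.any_eq_true, List.contains_iff_mem] at hany
      push Not at hany
      intro sub hs hxs; exact hany sub hs (by simpa using hxs)
    have : pvLast x L = some i := (pvLast_some x L i).mpr ⟨y, rest, h, hx, hn⟩
    rw [hj] at this
    injection this with hji
    simpa [hji] using hn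

-- B re-expressed index-free: the map over enumerate with the owner dict is pvAltRec
theorem pvB_aux (L : List (List Int)) (l : List (List Int)) (k : Nat) (h : l = L.drop k) :
    (PySem.List.enumerate l (k : Int)).map (fun p =>
      PySem.List.sorted
        (PySem.Set.ofList (p.2.filter (fun x =>
          ((PySem.List.enumerate L).foldl
              (fun d p => p.2.foldl (fun d x => d.insert x p.1) d)
              PySem.Dict.empty).getD x (-1) == p.1)))
        (fun x => x) false) = pvAltRec l := by
  induction l generalizing k with
  | nil => simp [PySem.List.enumerate, pvAltRec]
  | cons y rest ih =>
      have hdrop : L.drop (k + 1) = rest := by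
        rw [← List.tail_drop, ← h, List.tail_cons]
      have hk1 : (k : Int) + 1 = ((k + 1 : Nat) : Int) := by push_cast; ring
      rw [PySem.List.enumerate_cons, List.map_cons, pvAltRec]
      congr 1
      · congr 1
        congr 1
        exact List.filter_congr (fun x hx => pvOwner_pred L k y rest h.symm x hx)
      · rw [hk1, ih (k + 1) hdrop.symm]

theorem pvB_eq_rec (l : List (List Int)) : get_unique_items_alt l = pvAltRec l := by
  simpa only [get_unique_items_alt, Nat.cast_zero] using pvB_aux l l 0 rfl

-- the two heads agree: set-difference by the union of the tail = filter by suffix membership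
theorem pvHead_eq (y : List Int) (rest : List (List Int)) :
    PySem.List.sorted
      (PySem.Set.diff (PySem.Set.ofList y) (rest.reverse.foldl pvStepA ([], PySem.Set.empty)).2)
      (fun x => x) false =
    PySem.List.sorted
      (PySem.Set.ofList (y.filter (fun x => ! rest.any (fun lat => lat.contains x))))
      (fun x => x) false := by
  apply PySem.List.sorted_eq_sorted_of_perm _ _ _ (fun a b hab => hab)
  apply (List.perm_ext_iff_of_nodup ?_ ?_).mpr
  · intro x
    rw [PySem.Set.mem_diff, PySem.Set.mem_ofList, PySem.Set.mem_ofList, List.mem_filter,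
      pvSeenA_mem]
    simp [PySem.Set.empty]
  · exact PySem.Set.nodup_diff _ _ (PySem.Set.nodup_ofList y)
  · exact PySem.Set.nodup_ofList _

theorem pvMain (l : List (List Int)) : get_unique_items l = get_unique_items_alt l := by
  rw [pvB_eq_rec]
  induction l with
  | nil => rfl
  | cons y rest ih => rw [pvA_cons, ih, pvAltRec, pvHead_eq]

-- ===== VERDICT (by name: the statement is the Claim_ definition above) =====
theorem get_unique_items_spec : Claim_equal_get_unique_items :=
  fun l _ => pvMain l
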